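-- pv_equiv track=rewrite | github.com/vsai1242/ETL_FrameWrok | tests/conftest.py | _is_fabric_result
-- ===== SOURCE A (Python) =====
-- def _find_label(labels, key):
--     for label in labels or []:
--         if label.get("name") == key:
--             return label.get("value")
--     return None
--
-- def _is_fabric_result(result_data):
--     labels = result_data.get("labels", [])
--     parent_suite = _find_label(labels, "parentSuite") or ""
--     suite = _find_label(labels, "suite") or ""
--     package = _find_label(labels, "package") or ""
--
--     fabric_scopes = (
--         str(parent_suite).startswith("tests.fabric"),
--         str(package).startswith("tests.fabric"),
--         "fabric" in str(suite).lower(),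
--     )
--     if any(fabric_scopes):
--         return True
--
--     return any(
--         str(label.get("name", "")).lower() == "tag" and str(label.get("value", "")).lower() == "fabric"
--         for label in labels
--     )
-- ===== SOURCE B (Python) =====
-- def _is_fabric_result(result_data):
--     labels = result_data.get("labels", [])
--     first = {}
--     has_fabric_tag = False
--     for label in labels or []:
--         name = label.get("name")
--         if name is not None:
--             first.setdefault(name, label.get("value"))
--         if str(label.get("name", "")).lower() == "tag" and str(label.get("value", "")).lower() == "fabric":
--             has_fabric_tag = True
--     parent_suite = first.get("parentSuite") or ""
--     suite = first.get("suite") or ""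
--     package = first.get("package") or ""
--     return (
--         str(parent_suite).startswith("tests.fabric")
--         or str(package).startswith("tests.fabric")
--         or "fabric" in str(suite).lower()
--         or has_fabric_tag
--     )
-- ===== Notes on version B (the rewrite author's own statement) =====
-- stated objective: alternative
-- what changed: Replaces three separate first-match scans (_find_label for parentSuite/suite/package) plus a fourth any-scan with a single pass that builds a first-occurrence name->value dict via setdefault and sets the fabric-tag flag in the same loop.
import Mathlib
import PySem

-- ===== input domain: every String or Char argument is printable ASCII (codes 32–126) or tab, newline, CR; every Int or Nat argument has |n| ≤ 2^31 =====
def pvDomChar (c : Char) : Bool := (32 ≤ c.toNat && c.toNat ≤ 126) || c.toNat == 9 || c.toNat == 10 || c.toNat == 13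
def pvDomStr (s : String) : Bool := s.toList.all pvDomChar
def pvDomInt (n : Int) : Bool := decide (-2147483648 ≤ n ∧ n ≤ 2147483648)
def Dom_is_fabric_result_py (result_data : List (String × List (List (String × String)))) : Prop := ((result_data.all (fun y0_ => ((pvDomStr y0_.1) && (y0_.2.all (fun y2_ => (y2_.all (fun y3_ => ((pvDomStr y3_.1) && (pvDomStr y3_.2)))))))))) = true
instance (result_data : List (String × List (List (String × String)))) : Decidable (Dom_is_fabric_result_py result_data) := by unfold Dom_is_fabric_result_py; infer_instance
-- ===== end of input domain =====

-- B merges A's three _find_label scans and the final any-scan into one pass that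
-- builds a first-occurrence name->value dict (setdefault) and the tag flag together.

-- ===== PORT A =====
-- _find_label: first label whose "name" equals key; returns its "value" (possibly absent)
def findLabelA (labels : List (List (String × String))) (key : String) : Option String :=
  match labels with
  | [] => none
  | l :: rest =>
      if (PySem.Dict.mk l).get? "name" == some key then (PySem.Dict.mk l).get? "value"
      else findLabelA rest key

def is_fabric_result_py (result_data : List (String × List (List (String × String)))) : Bool :=
  let labels := (PySem.Dict.mk result_data).getD "labels" []
  let parent_suite := (findLabelA labels "parentSuite").getD ""
  let suite := (findLabelA labels "suite").getD ""
  let package := (findLabelA labels "package").getD ""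
  if PySem.Str.startswith parent_suite "tests.fabric"
     || PySem.Str.startswith package "tests.fabric"
     || PySem.Str.isIn "fabric" (PySem.Str.lower suite) then true
  else
    labels.any (fun l =>
      PySem.Str.lower ((PySem.Dict.mk l).getD "name" "") == "tag"
      && PySem.Str.lower ((PySem.Dict.mk l).getD "value" "") == "fabric")

-- ===== PORT B =====
-- one step of B's single loop: first-occurrence dict via setdefault + fabric-tag flag
def stepB (st : PySem.Dict String (Option String) × Bool) (l : List (String × String)) :
    PySem.Dict String (Option String) × Bool :=
  let d := match (PySem.Dict.mk l).get? "name" with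
           | some n => st.1.setdefault n ((PySem.Dict.mk l).get? "value")
           | none => st.1
  let t := st.2 ||
      (PySem.Str.lower ((PySem.Dict.mk l).getD "name" "") == "tag"
       && PySem.Str.lower ((PySem.Dict.mk l).getD "value" "") == "fabric")
  (d, t)

-- first.get(k) or "" : missing key and stored None both collapse to ""
def firstGetB (d : PySem.Dict String (Option String)) (k : String) : String :=
  ((d.get? k).getD none).getD ""

def is_fabric_result_py_alt (result_data : List (String × List (List (String × String)))) : Bool :=
  let labels := (PySem.Dict.mk result_data).getD "labels" []
  let st := labels.foldl stepB (PySem.Dict.empty, false)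
  let parent_suite := firstGetB st.1 "parentSuite"
  let suite := firstGetB st.1 "suite"
  let package := firstGetB st.1 "package"
  PySem.Str.startswith parent_suite "tests.fabric"
    || PySem.Str.startswith package "tests.fabric"
    || PySem.Str.isIn "fabric" (PySem.Str.lower suite)
    || st.2

-- ===== PRECONDITION & SPEC =====
def Spec_is_fabric_result_py (result_data : List (String × List (List (String × String)))) (out : Bool) : Prop := out = is_fabric_result_py_alt result_data
instance (result_data : List (String × List (List (String × String)))) (out : Bool) : Decidable (Spec_is_fabric_result_py result_data out) := by unfold Spec_is_fabric_result_py; infer_instance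

-- ===== CLAIM (what is proved, stated in full; the proofs are below) =====
def Claim_equal_is_fabric_result_py : Prop := ∀ (result_data : List (String × List (List (String × String)))), Dom_is_fabric_result_py result_data → Spec_is_fabric_result_py result_data (is_fabric_result_py result_data)

-- ===== LEMMAS AND PROOFS =====

-- the fold's dict looks up as: old dict first, else first-occurrence entry of labels
lemma foldB_get (labels : List (List (String × String)))
    (d : PySem.Dict String (Option String)) (b : Bool) (k : String) :
    (labels.foldl stepB (d, b)).1.get? k =
      ((d.get? k).orElse (fun _ =>
        (labels.find? (fun l => (PySem.Dict.mk l).get? "name" == some k)).map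
          (fun l => (PySem.Dict.mk l).get? "value"))) := by
  induction labels generalizing d b with
  | nil => cases h : d.get? k <;> simp [h, Option.orElse]
  | cons l rest ih =>
    simp only [List.foldl_cons, List.find?]
    rcases hn : (PySem.Dict.mk l).get? "name" with _ | n
    · have : stepB (d, b) l = (d, (stepB (d, b) l).2) := by
        simp [stepB, hn]
      rw [this, ih]
      simp
    · by_cases hk : n = k
      · subst hk
        have : (stepB (d, b) l).1 = d.setdefault n ((PySem.Dict.mk l).get? "value") := by
          simp [stepB, hn]
        rw [show stepB (d, b) l = ((stepB (d, b) l).1, (stepB (d, b) l).2) from rfl, this, ih]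
        rw [PySem.Dict.get?_setdefault_self]
        cases h : d.get? n <;> simp [h, Option.orElse]
      · have : (stepB (d, b) l).1 = d.setdefault n ((PySem.Dict.mk l).get? "value") := by
          simp [stepB, hn]
        rw [show stepB (d, b) l = ((stepB (d, b) l).1, (stepB (d, b) l).2) from rfl, this, ih]
        rw [PySem.Dict.get?_setdefault_of_ne _ _ (Ne.symm hk)]
        simp [beq_eq_false_iff_ne.mpr hk]

-- the fold's flag is the any-scan of A's tag predicate
lemma foldB_flag (labels : List (List (String × String)))
    (d : PySem.Dict String (Option String)) (b : Bool) :
    (labels.foldl stepB (d, b)).2 =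
      (b || labels.any (fun l =>
        PySem.Str.lower ((PySem.Dict.mk l).getD "name" "") == "tag"
        && PySem.Str.lower ((PySem.Dict.mk l).getD "value" "") == "fabric")) := by
  induction labels generalizing d b with
  | nil => simp
  | cons l rest ih =>
    simp only [List.foldl_cons, List.any_cons, ih]
    have : (stepB (d, b) l).2 = (b ||
        (PySem.Str.lower ((PySem.Dict.mk l).getD "name" "") == "tag"
         && PySem.Str.lower ((PySem.Dict.mk l).getD "value" "") == "fabric")) := by
      simp [stepB]
    rw [this, Bool.or_assoc]

-- findLabelA is the first-occurrence entry, flattened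
lemma findLabelA_eq_find (labels : List (List (String × String))) (k : String) :
    findLabelA labels k =
      ((labels.find? (fun l => (PySem.Dict.mk l).get? "name" == some k)).map
        (fun l => (PySem.Dict.mk l).get? "value")).getD none := by
  induction labels with
  | nil => simp [findLabelA]
  | cons l rest ih =>
    simp only [findLabelA, List.find?]
    by_cases h : (PySem.Dict.mk l).get? "name" == some k
    · simp [h]
    · simp [h, ih]

-- B's lookup-or-"" equals A's _find_label-or-""
lemma firstGetB_eq (labels : List (List (String × String))) (k : String) :
    firstGetB (labels.foldl stepB (PySem.Dict.empty, false)).1 k =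
      (findLabelA labels k).getD "" := by
  unfold firstGetB
  rw [foldB_get, findLabelA_eq_find]
  have : (PySem.Dict.empty : PySem.Dict String (Option String)).get? k = none := by
    simp [PySem.Dict.empty, PySem.Dict.get?]
  rw [this]
  cases labels.find? (fun l => (PySem.Dict.mk l).get? "name" == some k) <;>
    simp [Option.orElse]

-- ===== VERDICT (by name: the statement is the Claim_ definition above) =====
theorem is_fabric_result_py_spec : Claim_equal_is_fabric_result_py := by
  intro result_data _
  unfold Spec_is_fabric_result_py is_fabric_result_py is_fabric_result_py_alt
  simp only [firstGetB_eq, foldB_flag, Bool.false_or]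
  split_ifs with h
  · rcases Bool.or_eq_true_iff.mp h with h' | h'
    · rcases Bool.or_eq_true_iff.mp h' with h'' | h'' <;>
        simp only [h'', Bool.true_or, Bool.or_true]
    · simp only [h', Bool.or_true, Bool.true_or]
  · rw [Bool.not_eq_true] at h
    rcases Bool.or_eq_false_iff.mp h with ⟨h', h3⟩
    rcases Bool.or_eq_false_iff.mp h' with ⟨h1, h2⟩
    rw [h1, h2, h3]
    simp only [Bool.false_or]
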